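-- pv_equiv track=rewrite | github.com/Bersaglieri412/Gymkhana-2021 | DiegoCordero_B02.py | reverseNumbers
-- ===== SOURCE A (Python) =====
-- def reverseNumbers(frase):
--     separado=frase.split()
--     bloque=[]
--     for i in separado:
--         if(i.isalpha()):
--             bloque.append(i)
--
--     bloque=bloque[::-1]
--     contador=0
--     for i in range(0,len(separado)):
--         if(separado[i].isalpha()):
--             separado[i]=bloque[contador]
--             contador=contador+1
--         else:
--             separado[i]=separado[i][::-1]
--
--     frase = ' '.join(separado)
--     return frase
-- ===== SOURCE B (Python) =====
-- def reverseNumbers(frase):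
--     # One pass reverses the characters of every non-alpha token; then the alpha
--     # tokens are reversed among their positions by an in-place two-pointer swap
--     # over the list of alpha-token indices.
--     sep = [t if t.isalpha() else t[::-1] for t in frase.split()]
--     idx = [i for i, t in enumerate(sep) if t.isalpha()]
--     l, r = 0, len(idx) - 1
--     while l < r:
--         sep[idx[l]], sep[idx[r]] = sep[idx[r]], sep[idx[l]]
--         l += 1
--         r -= 1
--     return ' '.join(sep)
-- ===== Notes on version B (the rewrite author's own statement) =====
-- stated objective: alternative
-- what changed: Instead of building a reversed copy of the alpha tokens and reassigning every position with a counter, B reverses non-alpha tokens in one pass and then reverses the alpha tokens in place with a two-pointer swap over their index list, walking inward from both ends.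
import Mathlib
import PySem

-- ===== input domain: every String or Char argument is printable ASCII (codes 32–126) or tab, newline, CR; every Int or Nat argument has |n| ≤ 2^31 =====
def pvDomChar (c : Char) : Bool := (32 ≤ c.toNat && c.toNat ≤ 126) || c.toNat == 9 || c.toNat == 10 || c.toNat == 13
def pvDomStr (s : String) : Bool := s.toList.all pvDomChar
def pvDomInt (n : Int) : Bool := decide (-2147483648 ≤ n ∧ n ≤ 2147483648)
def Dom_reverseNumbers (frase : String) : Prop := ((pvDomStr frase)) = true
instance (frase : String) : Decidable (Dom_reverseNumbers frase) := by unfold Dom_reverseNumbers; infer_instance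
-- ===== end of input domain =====

-- B replaces A's reversed-copy-plus-counter reassignment by one pass reversing the
-- non-alpha tokens followed by an in-place two-pointer swap over the alpha-token
-- index list (objective: alternative, same cost).

-- ===== PORT A =====
def reverseNumbers (frase : String) : String :=
  let separado := PySem.Str.split₀ frase
  let bloque : List String := separado.foldl
    (fun acc i => if PySem.Str.strIsalpha i then acc ++ [i] else acc) []
  let bloque := (PySem.List.slice? bloque none none (-1)).getD []
  let st := (PySem.List.pyRange 0 (separado.length : Int)).foldl
    (fun (st : List String × Int) i =>
      if PySem.Str.strIsalpha (PySem.List.pyGetD st.1 i "") then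
        (PySem.List.pySetD st.1 i (PySem.List.pyGetD bloque st.2 ""), st.2 + 1)
      else
        (PySem.List.pySetD st.1 i
          ((PySem.Str.slice? (PySem.List.pyGetD st.1 i "") none none (-1)).getD ""), st.2))
    (separado, (0 : Int))
  PySem.Str.join " " st.1

-- ===== PORT B =====
-- 't if t.isalpha() else t[::-1]'
def pvRevTok (t : String) : String :=
  if PySem.Str.strIsalpha t then t
  else (PySem.Str.slice? t none none (-1)).getD ""

-- the 'while l < r' two-pointer swap loop (fuel only makes it total: the pointers
-- close by 2 each pass, so idx.length passes always suffice)
def pvSwapLoop (idx : List Int) : Nat → List String → Int → Int → List String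
  | 0, sep, _, _ => sep
  | fuel + 1, sep, l, r =>
    if l < r then
      let a := PySem.List.pyGetD sep (PySem.List.pyGetD idx l 0) ""
      let b := PySem.List.pyGetD sep (PySem.List.pyGetD idx r 0) ""
      pvSwapLoop idx fuel
        (PySem.List.pySetD (PySem.List.pySetD sep (PySem.List.pyGetD idx l 0) b)
          (PySem.List.pyGetD idx r 0) a) (l + 1) (r - 1)
    else sep

def reverseNumbers_alt (frase : String) : String :=
  let sep := (PySem.Str.split₀ frase).map pvRevTok
  let idx := ((PySem.List.enumerate sep).filter (fun q => PySem.Str.strIsalpha q.2)).map (·.1)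
  let sep := pvSwapLoop idx idx.length sep 0 ((idx.length : Int) - 1)
  PySem.Str.join " " sep

-- ===== PRECONDITION & SPEC =====
def Spec_reverseNumbers (frase : String) (out : String) : Prop := out = reverseNumbers_alt frase
instance (frase : String) (out : String) : Decidable (Spec_reverseNumbers frase out) := by unfold Spec_reverseNumbers; infer_instance

-- ===== CLAIM (what is proved, stated in full; the proofs are below) =====
def Claim_equal_reverseNumbers : Prop := ∀ (frase : String), Dom_reverseNumbers frase → Spec_reverseNumbers frase (reverseNumbers frase)

-- ===== LEMMAS AND PROOFS =====

-- the common reference: walk the tokens, feeding alpha slots from rs in order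
def pvAssign : List String → List String → List String
  | [], _ => []
  | t :: ts, rs =>
    if PySem.Str.strIsalpha t then rs.headD "" :: pvAssign ts rs.tail
    else pvRevTok t :: pvAssign ts rs

def pvAlph (ts : List String) (j : Nat) : Bool := PySem.Str.strIsalpha (ts.getD j "")

def pvIdxN (ts : List String) : List Nat := (List.range ts.length).filter (pvAlph ts)

lemma pv_revTok_empty : pvRevTok "" = "" := by decide

lemma pv_alph_revTok (t : String) : PySem.Str.strIsalpha (pvRevTok t) = PySem.Str.strIsalpha t := by
  unfold pvRevTok
  split
  · rfl
  · rw [PySem.Str.slice?_none_none_neg_one, Option.getD_some]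
    simp [PySem.Str.strIsalpha, PySem.Chars.strIsalpha]

lemma pv_length_assign (ts rs : List String) : (pvAssign ts rs).length = ts.length := by
  induction ts generalizing rs with
  | nil => rfl
  | cons t ts ih => simp only [pvAssign]; split <;> simp [ih]

lemma pv_getD_tail {α : Type} (l : List α) (n : Nat) (d : α) : l.tail.getD n d = l.getD (n + 1) d := by
  cases l <;> simp [List.getD]

lemma pv_headD_getD {α : Type} (l : List α) (d : α) : l.headD d = l.getD 0 d := by
  cases l <;> rfl

lemma pv_getD_drop_headD {α : Type} (l : List α) (c : Nat) (d : α) :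
    (l.drop c).headD d = l.getD c d := by
  rw [List.headD_eq_head?_getD, List.head?_drop, List.getD_eq_getElem?_getD]

-- pointwise value of pvAssign (unconditional thanks to getD defaults)
lemma pv_assign_getD (ts : List String) (rs : List String) (j : Nat) :
    (pvAssign ts rs).getD j "" =
      if pvAlph ts j then rs.getD ((ts.take j).countP PySem.Str.strIsalpha) ""
      else pvRevTok (ts.getD j "") := by
  induction ts generalizing rs j with
  | nil =>
    simp [pvAssign, pvAlph, List.getD, pv_revTok_empty,
      show PySem.Chars.strIsalpha [] = false from by decide]
  | cons t ts ih =>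
    have hA0 : pvAlph (t :: ts) 0 = PySem.Str.strIsalpha t := rfl
    cases j with
    | zero =>
      by_cases hb : PySem.Str.strIsalpha t = true
      · have e1 : pvAssign (t :: ts) rs = rs.headD "" :: pvAssign ts rs.tail := by
          simp only [pvAssign, if_pos hb]
        rw [e1, List.getD_cons_zero, hA0, if_pos hb, List.take_zero, List.countP_nil,
          pv_headD_getD]
      · have e1 : pvAssign (t :: ts) rs = pvRevTok t :: pvAssign ts rs := by
          simp only [pvAssign, if_neg hb]
        rw [e1, List.getD_cons_zero, hA0, if_neg hb, List.getD_cons_zero]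
    | succ j =>
      have hA1 : pvAlph (t :: ts) (j + 1) = pvAlph ts j := rfl
      by_cases hb : PySem.Str.strIsalpha t = true
      · have e1 : pvAssign (t :: ts) rs = rs.headD "" :: pvAssign ts rs.tail := by
          simp only [pvAssign, if_pos hb]
        rw [e1, List.getD_cons_succ, ih, hA1, List.getD_cons_succ, List.take_succ_cons,
          List.countP_cons, if_pos hb, pv_getD_tail]
      · have e1 : pvAssign (t :: ts) rs = pvRevTok t :: pvAssign ts rs := by
          simp only [pvAssign, if_neg hb]
        rw [e1, List.getD_cons_succ, ih, hA1, List.getD_cons_succ, List.take_succ_cons,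
          List.countP_cons, if_neg hb, Nat.add_zero]

-- ===== A's loop =====
lemma pv_getD_append {α : Type} (pre suf : List α) (t : α) (d : α) :
    (pre ++ t :: suf).getD pre.length d = t := by
  induction pre with
  | nil => rfl
  | cons a pre ih => simpa [List.getD] using ih

lemma pv_set_append {α : Type} (pre suf : List α) (t v : α) :
    (pre ++ t :: suf).set pre.length v = pre ++ v :: suf := by
  induction pre with
  | nil => rfl
  | cons a pre ih => simp [ih]

lemma pv_loopA (bq : List String) :
    ∀ (suf pre : List String) (c : Nat),
    (PySem.List.pyRange (pre.length : Int) ((pre.length + suf.length : Nat) : Int)).foldl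
      (fun (st : List String × Int) i =>
        if PySem.Str.strIsalpha (PySem.List.pyGetD st.1 i "") then
          (PySem.List.pySetD st.1 i (PySem.List.pyGetD bq st.2 ""), st.2 + 1)
        else
          (PySem.List.pySetD st.1 i
            ((PySem.Str.slice? (PySem.List.pyGetD st.1 i "") none none (-1)).getD ""), st.2))
      (pre ++ suf, (c : Int))
    = (pre ++ pvAssign suf (bq.drop c), ((c + suf.countP PySem.Str.strIsalpha : Nat) : Int)) := by
  intro suf
  induction suf with
  | nil =>
    intro pre c
    simp [pvAssign, pysem]
  | cons t suf ih =>
    intro pre c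
    have hlt : (pre.length : Int) < ((pre.length + (t :: suf).length : Nat) : Int) := by
      push_cast [List.length_cons]; omega
    rw [PySem.List.pyRange_one_cons hlt, List.foldl_cons]
    have hget : PySem.List.pyGetD (pre ++ t :: suf) ((pre.length : Nat) : Int) "" = t := by
      rw [PySem.List.pyGetD_natCast, pv_getD_append]
    have hset : ∀ v, PySem.List.pySetD (pre ++ t :: suf) ((pre.length : Nat) : Int) v
        = pre ++ v :: suf := by
      intro v
      rw [PySem.List.pySetD_of_nonneg _ _ (by positivity), Int.toNat_natCast, pv_set_append]
    have hgc : PySem.List.pyGetD bq ((c : Nat) : Int) "" = bq.getD c "" :=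
      PySem.List.pyGetD_natCast bq c ""
    by_cases hb : PySem.Str.strIsalpha t = true
    · simp only [hget, hgc]
      rw [if_pos hb, hset]
      have h2 := ih (pre ++ [bq.getD c ""]) (c + 1)
      simp only [List.length_append, List.length_cons, List.length_nil, List.append_assoc,
        List.singleton_append] at h2 ⊢
      have hc1 : ((c : Int) + 1) = (((c + 1 : Nat)) : Int) := by push_cast; ring
      have hb1 : ((pre.length + 1 : Nat) : Int) = (pre.length : Int) + 1 := by push_cast; ring
      have hb2 : (pre.length + 1) + suf.length = pre.length + (suf.length + 1) := by omega
      rw [hc1, ← hb1, ← hb2, h2]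
      simp only [Prod.mk.injEq]
      refine ⟨?_, ?_⟩
      · simp only [pvAssign, if_pos hb, pv_getD_drop_headD, List.tail_drop]
      · congr 1
        have hbC : PySem.Chars.strIsalpha t.toList = true := hb
        simp [hbC]
        omega
    · simp only [hget, hgc]
      rw [if_neg hb, hset]
      have h2 := ih (pre ++ [(PySem.Str.slice? t none none (-1)).getD ""]) c
      simp only [List.length_append, List.length_cons, List.length_nil, List.append_assoc,
        List.singleton_append] at h2 ⊢
      have hb1 : ((pre.length + 1 : Nat) : Int) = (pre.length : Int) + 1 := by push_cast; ring
      have hb2 : (pre.length + 1) + suf.length = pre.length + (suf.length + 1) := by omega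
      rw [← hb1, ← hb2, h2]
      simp only [Prod.mk.injEq]
      refine ⟨?_, ?_⟩
      · simp only [pvAssign, if_neg hb, pvRevTok]
      · congr 1
        have hbC : ¬ PySem.Chars.strIsalpha t.toList = true := hb
        simp [hbC]

lemma pv_A_char (frase : String) :
    reverseNumbers frase =
      PySem.Str.join " "
        (pvAssign (PySem.Str.split₀ frase)
          (((PySem.Str.split₀ frase).filter PySem.Str.strIsalpha).reverse)) := by
  have h := pv_loopA (((PySem.Str.split₀ frase).filter PySem.Str.strIsalpha).reverse)
    (PySem.Str.split₀ frase) [] 0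
  simp only [List.nil_append, List.length_nil, Nat.cast_zero, List.drop_zero,
    zero_add] at h
  unfold reverseNumbers
  simp only [PySem.List.foldl_append_if_eq_filter, List.nil_append,
    PySem.List.slice?_none_none_neg_one, Option.getD_some]
  rw [h]

-- ===== facts about pvIdxN =====
lemma pv_idxN_pairwise (ts : List String) : (pvIdxN ts).Pairwise (· < ·) :=
  List.Pairwise.filter _ List.pairwise_lt_range

lemma pv_idxN_mem (ts : List String) (j : Nat) :
    j ∈ pvIdxN ts ↔ j < ts.length ∧ pvAlph ts j := by
  simp [pvIdxN, List.mem_filter, List.mem_range]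

lemma pv_idxN_mono (ts : List String) (k1 k2 : Nat) (h12 : k1 < k2) (h2 : k2 < (pvIdxN ts).length) :
    (pvIdxN ts).getD k1 0 < (pvIdxN ts).getD k2 0 := by
  have h1 : k1 < (pvIdxN ts).length := lt_trans h12 h2
  rw [List.getD_eq_getElem _ _ h1, List.getD_eq_getElem _ _ h2]
  exact List.pairwise_iff_getElem.mp (pv_idxN_pairwise ts) k1 k2 h1 h2 h12

lemma pv_idxN_lt (ts : List String) (k : Nat) (hk : k < (pvIdxN ts).length) :
    (pvIdxN ts).getD k 0 < ts.length := by
  have := (pv_idxN_mem ts ((pvIdxN ts).getD k 0)).mp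
    (by rw [List.getD_eq_getElem _ _ hk]; exact List.getElem_mem _)
  exact this.1

lemma pv_idxN_alph (ts : List String) (k : Nat) (hk : k < (pvIdxN ts).length) :
    pvAlph ts ((pvIdxN ts).getD k 0) = true := by
  have := (pv_idxN_mem ts ((pvIdxN ts).getD k 0)).mp
    (by rw [List.getD_eq_getElem _ _ hk]; exact List.getElem_mem _)
  exact this.2

lemma pv_idxN_ne (ts : List String) (k p : Nat) (hk : k < (pvIdxN ts).length)
    (hp : p < (pvIdxN ts).length) (hne : k ≠ p) :
    (pvIdxN ts).getD k 0 ≠ (pvIdxN ts).getD p 0 := by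
  rcases Nat.lt_or_gt_of_ne hne with h | h
  · exact Nat.ne_of_lt (pv_idxN_mono ts _ _ h hp)
  · exact (Nat.ne_of_lt (pv_idxN_mono ts _ _ h hk)).symm

-- for a strictly increasing list, the elements below L[k] are exactly the first k
lemma pv_sorted_filter_lt_take : ∀ (L : List Nat), L.Pairwise (· < ·) →
    ∀ (k : Nat) (h : k < L.length), L.filter (fun x => x < L[k]) = L.take k := by
  intro L hL
  induction L with
  | nil => intro k h; simp at h
  | cons a L ih =>
    intro k h
    cases k with
    | zero =>
      simp only [List.getElem_cons_zero, List.take_zero]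
      rw [List.filter_eq_nil_iff]
      intro x hx
      rcases List.mem_cons.mp hx with rfl | hx
      · simp
      · have := (List.pairwise_cons.mp hL).1 x hx
        simp only [decide_eq_true_eq]
        omega
    | succ k =>
      have hk : k < L.length := by simpa using h
      have ha : a < L[k] := (List.pairwise_cons.mp hL).1 _ (List.getElem_mem hk)
      simp only [List.getElem_cons_succ, List.take_succ_cons, List.filter_cons]
      rw [if_pos (by simpa using ha)]
      exact congrArg (a :: ·) (ih (List.pairwise_cons.mp hL).2 k hk)

lemma pv_range_filter_lt (j : Nat) : ∀ (n : Nat), j ≤ n →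
    (List.range n).filter (fun x => x < j) = List.range j := by
  intro n
  induction n with
  | zero =>
    intro h
    have : j = 0 := Nat.le_zero.mp h
    subst this; rfl
  | succ n ih =>
    intro h
    by_cases hj : j = n + 1
    · subst hj
      rw [List.filter_eq_self.mpr]
      intro x hx
      simpa using List.mem_range.mp hx
    · have hj' : j ≤ n := by omega
      rw [List.range_succ, List.filter_append, ih hj']
      have hnj : ¬ (n < j) := by omega
      simp [hnj]

lemma pv_idxN_rank (ts : List String) (k : Nat) (hk : k < (pvIdxN ts).length) :
    ((List.range ((pvIdxN ts).getD k 0)).filter (pvAlph ts)).length = k := by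
  have hj : (pvIdxN ts).getD k 0 = (pvIdxN ts)[k] := List.getD_eq_getElem _ _ hk
  have hjn : (pvIdxN ts)[k] ≤ ts.length := le_of_lt (by rw [← hj]; exact pv_idxN_lt ts k hk)
  have h1 : (List.range ((pvIdxN ts)[k])).filter (pvAlph ts)
      = ((List.range ts.length).filter (fun x => x < (pvIdxN ts)[k])).filter (pvAlph ts) := by
    rw [pv_range_filter_lt _ _ hjn]
  have h2 : ((List.range ts.length).filter (fun x => x < (pvIdxN ts)[k])).filter (pvAlph ts)
      = (pvIdxN ts).filter (fun x => x < (pvIdxN ts)[k]) := by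
    rw [List.filter_filter]
    show _ = List.filter _ (List.filter _ _)
    rw [List.filter_filter]
    congr 1
    funext x
    rw [Bool.and_comm]
  have h3 := pv_sorted_filter_lt_take (pvIdxN ts) (pv_idxN_pairwise ts) k hk
  rw [hj, h1, h2, h3, List.length_take]
  omega

lemma pv_cnt_take : ∀ (ts : List String) (j : Nat), j ≤ ts.length →
    (ts.take j).countP PySem.Str.strIsalpha =
      ((List.range j).filter (pvAlph ts)).length := by
  intro ts
  induction ts with
  | nil =>
    intro j h
    have : j = 0 := Nat.le_zero.mp (by simpa using h)
    subst this; rfl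
  | cons t ts ih =>
    intro j h
    cases j with
    | zero => rfl
    | succ j =>
      have hcomp : (pvAlph (t :: ts)) ∘ Nat.succ = pvAlph ts := rfl
      have h0 : pvAlph (t :: ts) 0 = PySem.Str.strIsalpha t := rfl
      rw [List.take_succ_cons, List.countP_cons, List.range_succ_eq_map, List.filter_cons]
      rw [ih j (by simpa using h)]
      rw [List.filter_map, hcomp, h0]
      by_cases hb : PySem.Str.strIsalpha t = true
      · have hbC : PySem.Chars.strIsalpha t.toList = true := hb
        simp [hbC]
      · have hbC : ¬ PySem.Chars.strIsalpha t.toList = true := hb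
        simp [hbC]

lemma pv_filter_eq_map_idxN : ∀ (ts : List String),
    ts.filter PySem.Str.strIsalpha = (pvIdxN ts).map (fun j => ts.getD j "") := by
  intro ts
  induction ts with
  | nil => rfl
  | cons t ts ih =>
    have hcomp : (pvAlph (t :: ts)) ∘ Nat.succ = pvAlph ts := rfl
    have h0 : pvAlph (t :: ts) 0 = PySem.Str.strIsalpha t := rfl
    unfold pvIdxN
    rw [List.filter_cons, List.length_cons, List.range_succ_eq_map, List.filter_cons,
      List.filter_map, hcomp, h0, ih]
    by_cases hb : PySem.Str.strIsalpha t = true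
    · rw [if_pos hb, if_pos hb, List.map_cons, List.map_map]
      rfl
    · rw [if_neg hb, if_neg hb, List.map_map]
      rfl

-- ===== B's swap loop =====
lemma pv_pySetD_natCast {α : Type} (xs : List α) (n : Nat) (v : α) :
    PySem.List.pySetD xs ((n : Nat) : Int) v = xs.set n v := by
  rw [PySem.List.pySetD_of_nonneg _ _ (Int.natCast_nonneg n), Int.toNat_natCast]

lemma pv_getD_set_ne {α : Type} (xs : List α) (i j : Nat) (v d : α) (h : i ≠ j) :
    (xs.set i v).getD j d = xs.getD j d := by
  simp [List.getD_eq_getElem?_getD, List.getElem?_set_ne h]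

lemma pv_getD_set_self {α : Type} (xs : List α) (i : Nat) (v d : α) (h : i < xs.length) :
    (xs.set i v).getD i d = v := by
  simp [List.getD_eq_getElem?_getD, List.getElem?_set_self h]

lemma pv_swap_inv (ts : List String) :
    ∀ (fuel : Nat) (l r : Int) (sep : List String),
    r - l ≤ 2 * (fuel : Int) →
    0 ≤ l → r < ((pvIdxN ts).length : Int) → l + r = ((pvIdxN ts).length : Int) - 1 →
    sep.length = ts.length →
    (∀ k : Nat, k < (pvIdxN ts).length → l ≤ (k : Int) → (k : Int) ≤ r →
      sep.getD ((pvIdxN ts).getD k 0) "" = (ts.map pvRevTok).getD ((pvIdxN ts).getD k 0) "") →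
    (∀ k : Nat, k < (pvIdxN ts).length → ((k : Int) < l ∨ r < (k : Int)) →
      sep.getD ((pvIdxN ts).getD k 0) "" =
        (ts.map pvRevTok).getD ((pvIdxN ts).getD ((pvIdxN ts).length - 1 - k) 0) "") →
    (∀ j : Nat, j < ts.length → pvAlph ts j = false →
      sep.getD j "" = (ts.map pvRevTok).getD j "") →
    (pvSwapLoop ((pvIdxN ts).map (fun (j : Nat) => (j : Int))) fuel sep l r).length = ts.length ∧
    (∀ k : Nat, k < (pvIdxN ts).length →
      (pvSwapLoop ((pvIdxN ts).map (fun (j : Nat) => (j : Int))) fuel sep l r).getD ((pvIdxN ts).getD k 0) "" =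
        (ts.map pvRevTok).getD ((pvIdxN ts).getD ((pvIdxN ts).length - 1 - k) 0) "") ∧
    (∀ j : Nat, j < ts.length → pvAlph ts j = false →
      (pvSwapLoop ((pvIdxN ts).map (fun (j : Nat) => (j : Int))) fuel sep l r).getD j "" =
        (ts.map pvRevTok).getD j "") := by
  intro fuel
  induction fuel with
  | zero =>
    intro l r sep hd hl hr hsum hlen H1 H2 H3
    refine ⟨hlen, ?_, H3⟩
    intro k hk
    by_cases hin : l ≤ (k : Int) ∧ (k : Int) ≤ r
    · have hk2 : (pvIdxN ts).length - 1 - k = k := by omega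
      rw [hk2]
      exact H1 k hk hin.1 hin.2
    · exact H2 k hk (by omega)
  | succ fuel ih =>
    intro l r sep hd hl hr hsum hlen H1 H2 H3
    by_cases hlr : l < r
    · have hlm : l.toNat < (pvIdxN ts).length := by omega
      have hrm : r.toNat < (pvIdxN ts).length := by omega
      have hlc : ((l.toNat : Nat) : Int) = l := by omega
      have hrc : ((r.toNat : Nat) : Int) = r := by omega
      have hgl : PySem.List.pyGetD ((pvIdxN ts).map (fun (j : Nat) => (j : Int))) l 0
          = (((pvIdxN ts).getD l.toNat 0 : Nat) : Int) := by
        rw [PySem.List.pyGetD_of_nonneg _ _ hl]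
        simpa using List.getD_map (pvIdxN ts) 0 (n := l.toNat) (fun (j : Nat) => (j : Int))
      have hgr : PySem.List.pyGetD ((pvIdxN ts).map (fun (j : Nat) => (j : Int))) r 0
          = (((pvIdxN ts).getD r.toNat 0 : Nat) : Int) := by
        rw [PySem.List.pyGetD_of_nonneg _ _ (by omega)]
        simpa using List.getD_map (pvIdxN ts) 0 (n := r.toNat) (fun (j : Nat) => (j : Int))
      have hij : (pvIdxN ts).getD l.toNat 0 < (pvIdxN ts).getD r.toNat 0 :=
        pv_idxN_mono ts _ _ (by omega) hrm
      have hi1n : (pvIdxN ts).getD l.toNat 0 < ts.length := pv_idxN_lt ts _ hlm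
      have hi2n : (pvIdxN ts).getD r.toNat 0 < ts.length := pv_idxN_lt ts _ hrm
      simp only [pvSwapLoop]
      rw [if_pos hlr]
      simp only [hgl, hgr, PySem.List.pyGetD_natCast, pv_pySetD_natCast]
      set i1 := (pvIdxN ts).getD l.toNat 0 with hi1
      set i2 := (pvIdxN ts).getD r.toNat 0 with hi2
      set sep' := (sep.set i1 (sep.getD i2 "")).set i2 (sep.getD i1 "") with hsep'
      have hlen' : sep'.length = ts.length := by simp [hsep', hlen]
      have hval1 : sep.getD i1 "" = (ts.map pvRevTok).getD i1 "" :=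
        H1 l.toNat hlm (by omega) (by omega)
      have hval2 : sep.getD i2 "" = (ts.map pvRevTok).getD i2 "" :=
        H1 r.toNat hrm (by omega) (by omega)
      have H1' : ∀ k : Nat, k < (pvIdxN ts).length → l + 1 ≤ (k : Int) → (k : Int) ≤ r - 1 →
          sep'.getD ((pvIdxN ts).getD k 0) "" = (ts.map pvRevTok).getD ((pvIdxN ts).getD k 0) "" := by
        intro k hk hk1 hk2
        have hne1 : i1 ≠ (pvIdxN ts).getD k 0 := pv_idxN_ne ts l.toNat k hlm hk (by omega)
        have hne2 : i2 ≠ (pvIdxN ts).getD k 0 := pv_idxN_ne ts r.toNat k hrm hk (by omega)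
        rw [hsep', pv_getD_set_ne _ _ _ _ _ hne2, pv_getD_set_ne _ _ _ _ _ hne1]
        exact H1 k hk (by omega) (by omega)
      have H2' : ∀ k : Nat, k < (pvIdxN ts).length → ((k : Int) < l + 1 ∨ r - 1 < (k : Int)) →
          sep'.getD ((pvIdxN ts).getD k 0) "" =
            (ts.map pvRevTok).getD ((pvIdxN ts).getD ((pvIdxN ts).length - 1 - k) 0) "" := by
        intro k hk hcase
        by_cases hkl : k = l.toNat
        · subst hkl
          have hmr : (pvIdxN ts).length - 1 - l.toNat = r.toNat := by omega
          rw [hsep', pv_getD_set_ne _ _ _ _ _ (Nat.ne_of_lt hij).symm,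
            pv_getD_set_self _ _ _ _ (by omega), hmr]
          exact hval2
        · by_cases hkr : k = r.toNat
          · subst hkr
            have hml : (pvIdxN ts).length - 1 - r.toNat = l.toNat := by omega
            rw [hsep', pv_getD_set_self _ _ _ _ (by rw [List.length_set, hlen]; exact hi2n), hml]
            exact hval1
          · have houter : (k : Int) < l ∨ r < (k : Int) := by omega
            have hne1 : i1 ≠ (pvIdxN ts).getD k 0 := pv_idxN_ne ts l.toNat k hlm hk (by omega)
            have hne2 : i2 ≠ (pvIdxN ts).getD k 0 := pv_idxN_ne ts r.toNat k hrm hk (by omega)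
            rw [hsep', pv_getD_set_ne _ _ _ _ _ hne2, pv_getD_set_ne _ _ _ _ _ hne1]
            exact H2 k hk houter
      have H3' : ∀ j : Nat, j < ts.length → pvAlph ts j = false →
          sep'.getD j "" = (ts.map pvRevTok).getD j "" := by
        intro j hj hja
        have hne1 : i1 ≠ j := by
          intro hcon
          rw [← hcon] at hja
          rw [pv_idxN_alph ts l.toNat hlm] at hja
          exact absurd hja (by decide)
        have hne2 : i2 ≠ j := by
          intro hcon
          rw [← hcon] at hja
          rw [pv_idxN_alph ts r.toNat hrm] at hja
          exact absurd hja (by decide)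
        rw [hsep', pv_getD_set_ne _ _ _ _ _ hne2, pv_getD_set_ne _ _ _ _ _ hne1]
        exact H3 j hj hja
      exact ih (l + 1) (r - 1) sep' (by push_cast at hd ⊢; omega)
        (by omega) (by omega) (by omega) hlen' H1' H2' H3'
    · simp only [pvSwapLoop]
      rw [if_neg hlr]
      refine ⟨hlen, ?_, H3⟩
      intro k hk
      by_cases hin : l ≤ (k : Int) ∧ (k : Int) ≤ r
      · have hk2 : (pvIdxN ts).length - 1 - k = k := by omega
        rw [hk2]
        exact H1 k hk hin.1 hin.2
      · exact H2 k hk (by omega)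

lemma pv_B_char (frase : String) :
    reverseNumbers_alt frase =
      PySem.Str.join " "
        (pvAssign (PySem.Str.split₀ frase)
          (((PySem.Str.split₀ frase).filter PySem.Str.strIsalpha).reverse)) := by
  set ts := PySem.Str.split₀ frase with hts
  -- pointwise value of the mapped list
  have hsep1get : ∀ j : Nat, ((ts.map pvRevTok).getD j "") = pvRevTok (ts.getD j "") := by
    intro j
    have h := List.getD_map ts "" (n := j) pvRevTok
    rw [pv_revTok_empty] at h
    exact h
  -- alpha positions are unchanged by pvRevTok
  have halph : pvAlph (ts.map pvRevTok) = pvAlph ts := by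
    funext j
    rw [pvAlph, hsep1get, pv_alph_revTok]
    rfl
  have hidxN : pvIdxN (ts.map pvRevTok) = pvIdxN ts := by
    unfold pvIdxN
    rw [List.length_map, halph]
  -- the port's index list is pvIdxN ts, cast to Int
  have hidx : ((PySem.List.enumerate (ts.map pvRevTok)).filter
        (fun q => PySem.Str.strIsalpha q.2)).map (·.1)
      = (pvIdxN ts).map (fun (j : Nat) => (j : Int)) := by
    rw [PySem.List.enumerate_eq_map_pyRange _ ""]
    show (((PySem.List.pyRange 0 ((ts.map pvRevTok).length : Int)).map
      (fun j => (j, PySem.List.pyGetD (ts.map pvRevTok) j ""))).filter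
        (fun q => PySem.Str.strIsalpha q.2)).map (·.1) = _
    rw [PySem.List.pyRange_zero_natCast, List.map_map, List.filter_map, List.map_map]
    have hpred : ((fun q => PySem.Str.strIsalpha q.2) ∘
        ((fun j => (j, PySem.List.pyGetD (ts.map pvRevTok) j "")) ∘ fun k : Nat => (k : Int)))
        = pvAlph ts := by
      funext k
      show PySem.Str.strIsalpha (PySem.List.pyGetD (ts.map pvRevTok) ((k : Nat) : Int) "") = _
      rw [PySem.List.pyGetD_natCast]
      show pvAlph (ts.map pvRevTok) k = pvAlph ts k
      rw [halph]
    rw [hpred, List.length_map]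
    show List.map _ (pvIdxN ts) = _
    exact List.map_congr_left (fun x _ => rfl)
  have hm1 : ((pvIdxN ts).map (fun (j : Nat) => (j : Int))).length = (pvIdxN ts).length := by
    simp
  -- run the loop invariant from the initial state
  have hmain := pv_swap_inv ts (pvIdxN ts).length 0
    (((pvIdxN ts).length : Int) - 1) (ts.map pvRevTok) (by omega) (le_refl 0) (by omega) (by omega)
    (by simp)
    (fun k hk _ _ => rfl)
    (fun k hk hc => by exfalso; omega)
    (fun j hj _ => rfl)
  obtain ⟨hlen, hAl, hNon⟩ := hmain
  -- assemble
  unfold reverseNumbers_alt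
  rw [← hts]
  simp only [hidx, hm1]
  congr 1
  apply List.ext_getElem
  · rw [hlen, pv_length_assign]
  · intro j hj1 hj2
    have hjn : j < ts.length := by rw [← hlen]; exact hj1
    rw [← List.getD_eq_getElem _ "" hj1, ← List.getD_eq_getElem _ "" hj2]
    by_cases ha : pvAlph ts j
    · -- alpha slot
      obtain ⟨k, hk, hkj⟩ := List.mem_iff_getElem.mp ((pv_idxN_mem ts j).mpr ⟨hjn, ha⟩)
      have hkj' : (pvIdxN ts).getD k 0 = j := by rw [List.getD_eq_getElem _ _ hk, hkj]
      have hmk : (pvIdxN ts).length - 1 - k < (pvIdxN ts).length := by omega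
      rw [← hkj', hAl k hk, hsep1get]
      have halphk : PySem.Str.strIsalpha
          (ts.getD ((pvIdxN ts).getD ((pvIdxN ts).length - 1 - k) 0) "") = true :=
        pv_idxN_alph ts _ hmk
      rw [show pvRevTok (ts.getD ((pvIdxN ts).getD ((pvIdxN ts).length - 1 - k) 0) "")
          = ts.getD ((pvIdxN ts).getD ((pvIdxN ts).length - 1 - k) 0) "" from by
        unfold pvRevTok
        rw [if_pos halphk]]
      rw [pv_assign_getD, hkj', if_pos ha, ← hkj']
      rw [pv_cnt_take ts ((pvIdxN ts).getD k 0) (le_of_lt (pv_idxN_lt ts k hk))]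
      rw [pv_idxN_rank ts k hk]
      rw [pv_filter_eq_map_idxN]
      have hrevlen : k < (((pvIdxN ts).map (fun j => ts.getD j "")).reverse).length := by
        simpa using hk
      rw [List.getD_eq_getElem _ _ hrevlen, List.getElem_reverse]
      simp only [List.getElem_map, List.length_map]
      rw [List.getD_eq_getElem _ _ hmk]
    · -- non-alpha slot
      rw [hNon j hjn (by simpa using ha), hsep1get, pv_assign_getD, if_neg (by simpa using ha)]

-- ===== VERDICT (by name: the statement is the Claim_ definition above) =====
theorem reverseNumbers_spec : Claim_equal_reverseNumbers := by
  intro frase _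
  unfold Spec_reverseNumbers
  rw [pv_A_char, pv_B_char]
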